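-- pv_equiv track=rewrite | github.com/riansaunders/coding-challenges | unique-3-lengths.py | ul
-- ===== SOURCE A (Python) =====
-- import collections
--
-- def ul(s):
--     letters = "abcdefghijklmnopqrstuvwxyz"
--     left = set()
--     res = set()
--     right = collections.Counter(s)
--     for m in range(len(s)):
--         right[s[m]] -= 1
--
--         for c in letters:
--             if c in left and c in right and right[c] > 0:
--                 res.add(c + s[m] + c)
--         left.add(s[m])
--     return len(res)
-- ===== SOURCE B (Python) =====
-- def ul(s):
--     first = {}
--     last = {}
--     for i, ch in enumerate(s):
--         if ch not in first:
--             first[ch] = i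
--         last[ch] = i
--     total = 0
--     for c in "abcdefghijklmnopqrstuvwxyz":
--         if c in first and first[c] < last[c]:
--             total += len(set(s[first[c] + 1:last[c]]))
--     return total
-- ===== Notes on version B (the rewrite author's own statement) =====
-- stated objective: faster
-- what changed: Replaces A's left-set/right-Counter sweep with a 26-letter check and string-set insertion at every position by one pass building first/last occurrence index dicts, then for each lowercase letter one distinct-count over the slice strictly between its first and last occurrence.
import Mathlib
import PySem

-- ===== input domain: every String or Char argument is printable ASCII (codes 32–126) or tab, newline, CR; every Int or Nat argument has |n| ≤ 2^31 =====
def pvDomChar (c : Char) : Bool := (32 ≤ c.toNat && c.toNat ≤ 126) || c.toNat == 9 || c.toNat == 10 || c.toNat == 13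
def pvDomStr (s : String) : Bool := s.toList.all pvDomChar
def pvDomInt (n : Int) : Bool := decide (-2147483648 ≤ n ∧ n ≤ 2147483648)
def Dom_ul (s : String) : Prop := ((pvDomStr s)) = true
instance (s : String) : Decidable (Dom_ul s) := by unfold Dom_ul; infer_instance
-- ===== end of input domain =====

-- B replaces A's left-set/right-Counter sweep (26 letter checks at every position) by
-- first/last occurrence index tables built in one pass, then one distinct-count over each
-- letter's first..last window; same return value, measurably faster (constant factor).

def ulLetters : List Char := "abcdefghijklmnopqrstuvwxyz".toList

-- ===== PORT A =====
def ul (s : String) : Int :=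
  let l := s.toList
  let fin := (PySem.List.pyRange 0 l.length 1).foldl
    (fun (st : PySem.Set Char × PySem.Set (List Char) × PySem.Dict Char Int) m =>
      let sm := PySem.List.pyGetD l m ' '
      let right := st.2.2.insert sm (st.2.2.getD sm 0 - 1)
      let res := ulLetters.foldl (fun r c =>
        if st.1.contains c && right.contains c && decide (0 < right.getD c 0)
        then r.add [c, sm, c] else r) st.2.1
      (st.1.add sm, res, right))
    (PySem.Set.empty, PySem.Set.empty, PySem.Dict.counter l)
  PySem.Set.len fin.2.1

-- ===== PORT B =====
def ul_alt (s : String) : Int :=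
  let l := s.toList
  let fl := (PySem.List.enumerate l 0).foldl
    (fun (fl : PySem.Dict Char Int × PySem.Dict Char Int) p =>
      let first := if fl.1.contains p.2 then fl.1 else fl.1.insert p.2 p.1
      (first, fl.2.insert p.2 p.1))
    (PySem.Dict.empty, PySem.Dict.empty)
  ulLetters.foldl (fun tot c =>
    if fl.1.contains c && decide (fl.1.getD c 0 < fl.2.getD c 0) then
      tot + PySem.Set.len (PySem.Set.ofList
        (PySem.List.slice l (some (fl.1.getD c 0 + 1)) (some (fl.2.getD c 0))))
    else tot) 0

-- ===== PRECONDITION & SPEC =====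
def Spec_ul (s : String) (out : Int) : Prop := out = ul_alt s
instance (s : String) (out : Int) : Decidable (Spec_ul s out) := by unfold Spec_ul; infer_instance

-- ===== CLAIM (what is proved, stated in full; the proofs are below) =====
def Claim_equal_ul : Prop := ∀ (s : String), Dom_ul s → Spec_ul s (ul s)

-- ===== LEMMAS AND PROOFS =====

theorem pv_nodup_add {α : Type} [BEq α] [LawfulBEq α] (s : PySem.Set α) (x : α)
    (h : s.Nodup) : (s.add x).Nodup := by
  unfold PySem.Set.add
  split
  · exact h
  · next hc =>
    simp [PySem.Set.contains] at hc
    simp only [List.nodup_append, List.nodup_singleton, true_and, h]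
    intro a ha b hb
    simp only [List.mem_singleton] at hb
    subst hb
    exact fun hax => hc (hax ▸ ha)

theorem pv_mem_foldl_addIf (cs : List Char) (q : Char → Bool) (g : Char → List Char)
    (res : PySem.Set (List Char)) (w : List Char) :
    w ∈ cs.foldl (fun r c => if q c then r.add (g c) else r) res ↔
      w ∈ res ∨ ∃ c ∈ cs, q c = true ∧ w = g c := by
  induction cs generalizing res with
  | nil => simp
  | cons x xs ih =>
    simp only [List.foldl_cons, ih]
    by_cases hq : q x = true
    · simp only [hq, if_true, PySem.Set.mem_add, List.mem_cons]
      constructor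
      · rintro (h|h)
        · rcases h with h|h
          · exact Or.inl h
          · exact Or.inr ⟨x, Or.inl rfl, hq, h⟩
        · obtain ⟨c, hc, h1, h2⟩ := h; exact Or.inr ⟨c, Or.inr hc, h1, h2⟩
      · rintro (h|h)
        · exact Or.inl (Or.inl h)
        · obtain ⟨c, hc, h1, h2⟩ := h
          rcases hc with rfl|hc
          · exact Or.inl (Or.inr h2)
          · exact Or.inr ⟨c, hc, h1, h2⟩
    · simp only [hq, if_false, List.mem_cons, Bool.false_eq_true]
      constructor
      · rintro (h|h)
        · exact Or.inl h
        · obtain ⟨c, hc, h1, h2⟩ := h; exact Or.inr ⟨c, Or.inr hc, h1, h2⟩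
      · rintro (h|h)
        · exact Or.inl h
        · obtain ⟨c, hc, h1, h2⟩ := h
          rcases hc with rfl|hc
          · exact absurd h1 hq
          · exact Or.inr ⟨c, hc, h1, h2⟩

theorem pv_nodup_foldl_addIf (cs : List Char) (q : Char → Bool) (g : Char → List Char)
    (res : PySem.Set (List Char)) (h : res.Nodup) :
    (cs.foldl (fun r c => if q c then r.add (g c) else r) res).Nodup := by
  induction cs generalizing res with
  | nil => exact h
  | cons x xs ih =>
    simp only [List.foldl_cons]
    apply ih
    split
    · exact pv_nodup_add _ _ h
    · exact h

theorem pv_foldl_pyRange_getD {σ : Type} (l : List Char) (f : σ → Char → σ) (st : σ) :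
    (PySem.List.pyRange 0 l.length 1).foldl
      (fun st m => f st (PySem.List.pyGetD l m ' ')) st = l.foldl f st := by
  induction l using List.reverseRecOn generalizing st with
  | nil => simp [PySem.List.pyRange]
  | append_singleton xs x ih =>
    have hl : ((xs ++ [x]).length : Int) = (xs.length : Int) + 1 := by simp
    rw [hl, PySem.List.pyRange_one_succ_right (by positivity), List.foldl_append,
      List.foldl_append]
    have hcong : (PySem.List.pyRange 0 xs.length 1).foldl
        (fun st m => f st (PySem.List.pyGetD (xs ++ [x]) m ' ')) st =
        (PySem.List.pyRange 0 xs.length 1).foldl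
        (fun st m => f st (PySem.List.pyGetD xs m ' ')) st := by
      apply PySem.List.foldl_congr_mem
      intro acc m hm
      rw [PySem.List.mem_pyRange_one] at hm
      obtain ⟨n, rfl⟩ : ∃ n : Nat, m = (n : Int) := ⟨m.toNat, by omega⟩
      have hn : n < xs.length := by exact_mod_cast hm.2
      rw [PySem.List.pyGetD_natCast, PySem.List.pyGetD_natCast,
        List.getD_append _ _ _ _ hn]
    rw [hcong, ih]
    simp [PySem.List.pyGetD_natCast, List.getD]

def pvABody (st : PySem.Set Char × PySem.Set (List Char) × PySem.Dict Char Int) (sm : Char) :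
    PySem.Set Char × PySem.Set (List Char) × PySem.Dict Char Int :=
  let right := st.2.2.insert sm (st.2.2.getD sm 0 - 1)
  let res := ulLetters.foldl (fun r c =>
    if st.1.contains c && right.contains c && decide (0 < right.getD c 0)
    then r.add [c, sm, c] else r) st.2.1
  (st.1.add sm, res, right)

theorem pv_Aloop (rest : List Char) : ∀ (pre : List Char) (res : PySem.Set (List Char))
    (right : PySem.Dict Char Int),
    (∀ c, right.getD c 0 = (rest.count c : Int)) →
    (∀ c, right.contains c = (pre ++ rest).contains c) →
    (∀ w, w ∈ (rest.foldl pvABody (PySem.Set.ofList pre, res, right)).2.1 ↔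
      w ∈ res ∨ ∃ c p q m, rest = p ++ m :: q ∧ c ∈ ulLetters ∧
        c ∈ pre ++ p ∧ c ∈ q ∧ w = [c, m, c]) := by
  induction rest with
  | nil =>
    intro pre res right _ _ w
    simp
  | cons x rest' ih =>
    intro pre res right hcnt hcon w
    rw [List.foldl_cons]
    have hleft : (PySem.Set.ofList pre).add x = PySem.Set.ofList (pre ++ [x]) := by
      rw [PySem.Set.ofList_eq_foldl, PySem.Set.ofList_eq_foldl, List.foldl_append]
      rfl
    have hcnt' : ∀ c, (right.insert x (right.getD x 0 - 1)).getD c 0 = (rest'.count c : Int) := by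
      intro c
      rw [PySem.Dict.getD_insert]
      by_cases hcx : c = x
      · subst hcx
        rw [if_pos rfl, hcnt]
        simp [List.count_cons]
      · rw [if_neg hcx, hcnt]
        simp [List.count_cons]
        exact fun h => hcx h.symm
    have hcon' : ∀ c, (right.insert x (right.getD x 0 - 1)).contains c =
        ((pre ++ [x]) ++ rest').contains c := by
      intro c
      rw [PySem.Dict.contains_insert, hcon, List.append_assoc]
      simp only [List.singleton_append]
      by_cases hcx : c = x
      · subst hcx
        simp
      · simp [hcx]
    have hbody : pvABody (PySem.Set.ofList pre, res, right) x =
        (PySem.Set.ofList (pre ++ [x]),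
         ulLetters.foldl (fun r c =>
            if (PySem.Set.ofList pre).contains c &&
               (right.insert x (right.getD x 0 - 1)).contains c &&
               decide (0 < (right.insert x (right.getD x 0 - 1)).getD c 0)
            then r.add [c, x, c] else r) res,
         right.insert x (right.getD x 0 - 1)) := by
      simp only [pvABody, hleft]
    rw [hbody, ih (pre ++ [x]) _ _ hcnt' hcon', pv_mem_foldl_addIf]
    -- now a propositional shuffle
    have hq : ∀ c, ((PySem.Set.ofList pre).contains c &&
        (right.insert x (right.getD x 0 - 1)).contains c &&
        decide (0 < (right.insert x (right.getD x 0 - 1)).getD c 0)) = true ↔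
        (c ∈ pre ∧ c ∈ rest') := by
      intro c
      rw [hcon', hcnt']
      simp only [Bool.and_eq_true, decide_eq_true_eq, PySem.Set.contains]
      constructor
      · rintro ⟨⟨h1, _⟩, h3⟩
        refine ⟨?_, ?_⟩
        · simpa [PySem.Set.mem_ofList] using h1
        · exact List.count_pos_iff.mp (by exact_mod_cast h3)
      · rintro ⟨h1, h2⟩
        refine ⟨⟨?_, ?_⟩, ?_⟩
        · simpa [PySem.Set.mem_ofList] using h1
        · simp [List.append_assoc]
          exact Or.inl h1
        · exact_mod_cast List.count_pos_iff.mpr h2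
    constructor
    · rintro ((h | ⟨c, hc, hqc, rfl⟩) | h)
      · exact Or.inl h
      · obtain ⟨h1, h2⟩ := (hq c).mp hqc
        exact Or.inr ⟨c, [], rest', x, rfl, hc, by simpa using h1, h2, rfl⟩
      · obtain ⟨c, p, q, m, hsplit, hc, hp, hqm, rfl⟩ := h
        refine Or.inr ⟨c, x :: p, q, m, by rw [hsplit]; simp, hc, ?_, hqm, rfl⟩
        simpa [List.append_assoc] using hp
    · rintro (h | ⟨c, p, q, m, hsplit, hc, hp, hqm, rfl⟩)
      · exact Or.inl (Or.inl h)
      · cases p with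
        | nil =>
          simp only [List.nil_append, List.cons.injEq] at hsplit
          obtain ⟨rfl, rfl⟩ := hsplit
          exact Or.inl (Or.inr ⟨c, hc, (hq c).mpr ⟨by simpa using hp, hqm⟩, rfl⟩)
        | cons y p' =>
          simp only [List.cons_append, List.cons.injEq] at hsplit
          obtain ⟨rfl, rfl⟩ := hsplit
          refine Or.inr ⟨c, p', q, m, rfl, hc, ?_, hqm, rfl⟩
          simpa [List.append_assoc] using hp

theorem pv_Aloop_nodup (rest : List Char) : ∀ (left : PySem.Set Char)
    (res : PySem.Set (List Char)) (right : PySem.Dict Char Int), res.Nodup →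
    (rest.foldl pvABody (left, res, right)).2.1.Nodup := by
  induction rest with
  | nil => intro left res right h; exact h
  | cons x rest' ih =>
    intro left res right h
    rw [List.foldl_cons]
    exact ih _ _ _ (pv_nodup_foldl_addIf _ _ _ _ h)

def pvLastIdx (l : List Char) (c : Char) : Nat :=
  match l with
  | [] => 0
  | _ :: xs => if c ∈ xs then pvLastIdx xs c + 1 else 0

theorem pv_idxOf_spec (l : List Char) (c : Char) (h : c ∈ l) :
    l.idxOf c < l.length ∧ l[l.idxOf c]? = some c ∧
      ∀ i < l.idxOf c, ∀ hi : i < l.length, l[i] ≠ c := by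
  induction l with
  | nil => cases h
  | cons x xs ih =>
    by_cases hx : x = c
    · subst hx
      simp [List.idxOf_cons_self]
    · have hc : c ∈ xs := by
        rcases List.mem_cons.mp h with heq | h2
        · exact absurd heq.symm hx
        · exact h2
      obtain ⟨h1, h2, h3⟩ := ih hc
      have hix : (x :: xs).idxOf c = xs.idxOf c + 1 := by
        simp [List.idxOf_cons, hx]
      refine ⟨by simpa [hix] using Nat.succ_lt_succ h1, by simpa [hix] using h2, ?_⟩
      intro i hi hil
      rw [hix] at hi
      cases i with
      | zero => simpa using hx
      | succ j =>
        intro hcon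
        exact h3 j (by omega) (by simpa using hil) (by simpa using hcon) 

theorem pv_lastIdx_spec (l : List Char) (c : Char) (h : c ∈ l) :
    pvLastIdx l c < l.length ∧ l[pvLastIdx l c]? = some c ∧
      ∀ i, pvLastIdx l c < i → ∀ hi : i < l.length, l[i] ≠ c := by
  induction l with
  | nil => cases h
  | cons x xs ih =>
    by_cases hm : c ∈ xs
    · obtain ⟨h1, h2, h3⟩ := ih hm
      have hla : pvLastIdx (x :: xs) c = pvLastIdx xs c + 1 := by
        simp [pvLastIdx, hm]
      refine ⟨by simpa [hla] using Nat.succ_lt_succ h1, by simpa [hla] using h2, ?_⟩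
      intro i hi hil
      rw [hla] at hi
      cases i with
      | zero => omega
      | succ j =>
        intro hcon
        exact h3 j (by omega) (by simpa using hil) (by simpa using hcon)
    · have hxc : x = c := by
        rcases List.mem_cons.mp h with heq | h2
        · exact heq.symm
        · exact absurd h2 hm
      have hla : pvLastIdx (x :: xs) c = 0 := by simp [pvLastIdx, hm]
      refine ⟨by simp [hla], by rw [hla]; simp [hxc], ?_⟩
      intro i hi hil
      rw [hla] at hi
      cases i with
      | zero => omega
      | succ j =>
        intro hcon
        exact hm (hcon ▸ List.getElem_mem (by simpa using hil))

def pvGood (l : List Char) (c m : Char) : Prop :=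
  c ∈ ulLetters ∧ ∃ p q, l = p ++ m :: q ∧ c ∈ p ∧ c ∈ q

def pvMid (l : List Char) (c : Char) : Finset Char :=
  ((l.drop (l.idxOf c + 1)).take (pvLastIdx l c - l.idxOf c - 1)).toFinset

theorem pv_mem_window (l : List Char) (c m : Char) (hc : c ∈ l) :
    m ∈ (l.drop (l.idxOf c + 1)).take (pvLastIdx l c - l.idxOf c - 1) ↔
      ∃ j, l.idxOf c < j ∧ j < pvLastIdx l c ∧ ∃ hj : j < l.length, l[j] = m := by
  obtain ⟨hla, _, _⟩ := pv_lastIdx_spec l c hc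
  rw [List.mem_iff_getElem]
  constructor
  · rintro ⟨t, ht, hgm⟩
    have htlen : t < pvLastIdx l c - l.idxOf c - 1 ∧ t < l.length - (l.idxOf c + 1) := by
      simpa [List.length_take, List.length_drop] using ht
    refine ⟨l.idxOf c + 1 + t, by omega, by omega, by omega, ?_⟩
    rw [List.getElem_take, List.getElem_drop] at hgm
    exact hgm
  · rintro ⟨j, h1, h2, hj, hgm⟩
    refine ⟨j - l.idxOf c - 1, by simp [List.length_take, List.length_drop]; omega, ?_⟩
    rw [List.getElem_take, List.getElem_drop]
    have : l.idxOf c + 1 + (j - l.idxOf c - 1) = j := by omega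
    simp_rw [this]
    exact hgm

theorem pv_good_iff (l : List Char) (c m : Char) :
    pvGood l c m ↔ c ∈ ulLetters ∧ c ∈ l ∧ l.idxOf c < pvLastIdx l c ∧ m ∈ pvMid l c := by
  unfold pvGood pvMid
  constructor
  · rintro ⟨hlet, p, q, rfl, hp, hq⟩
    have hc : c ∈ p ++ m :: q := List.mem_append.mpr (Or.inl hp)
    obtain ⟨hfi, hfg, hfmin⟩ := pv_idxOf_spec _ c hc
    obtain ⟨hla, hlg, hlmax⟩ := pv_lastIdx_spec _ c hc
    obtain ⟨i, hpi⟩ := List.mem_iff_getElem?.mp hp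
    have hip : i < p.length := ((List.getElem?_eq_some_iff).mp hpi).1
    have hli : (p ++ m :: q)[i]? = some c := by
      rw [List.getElem?_append_left hip]; exact hpi
    obtain ⟨hil, hlieq⟩ := (List.getElem?_eq_some_iff).mp hli
    have hfi_le : (p ++ m :: q).idxOf c ≤ i := by
      by_contra hlt
      exact hfmin i (by omega) hil hlieq
    obtain ⟨k, hqk⟩ := List.mem_iff_getElem?.mp hq
    have hkq : k < q.length := ((List.getElem?_eq_some_iff).mp hqk).1
    have hlk : (p ++ m :: q)[p.length + 1 + k]? = some c := by
      rw [List.getElem?_append_right (by omega)]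
      have h1 : p.length + 1 + k - p.length = k + 1 := by omega
      rw [h1]
      simpa using hqk
    obtain ⟨hkl, hlkeq⟩ := (List.getElem?_eq_some_iff).mp hlk
    have hla_ge : p.length + 1 + k ≤ pvLastIdx (p ++ m :: q) c := by
      by_contra hlt
      exact hlmax (p.length + 1 + k) (by omega) hkl hlkeq
    have hjm : (p ++ m :: q)[p.length]? = some m := by
      rw [List.getElem?_append_right (le_refl _)]
      simp
    refine ⟨hlet, hc, by omega, ?_⟩
    rw [List.mem_toFinset, pv_mem_window _ _ _ hc]
    obtain ⟨hjl, hjeq⟩ := (List.getElem?_eq_some_iff).mp hjm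
    exact ⟨p.length, by omega, by omega, hjl, hjeq⟩
  · rintro ⟨hlet, hc, hfl, hmid⟩
    rw [List.mem_toFinset, pv_mem_window _ _ _ hc] at hmid
    obtain ⟨j, h1, h2, hj, hgm⟩ := hmid
    obtain ⟨hfi, hfg, _⟩ := pv_idxOf_spec _ c hc
    obtain ⟨hla, hlg, _⟩ := pv_lastIdx_spec _ c hc
    refine ⟨hlet, l.take j, l.drop (j + 1), ?_, ?_, ?_⟩
    · rw [← hgm]
      rw [List.getElem_cons_drop hj]
      exact (List.take_append_drop j l).symm
    · rw [List.mem_iff_getElem]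
      refine ⟨l.idxOf c, by simp [List.length_take]; omega, ?_⟩
      rw [List.getElem_take]
      exact ((List.getElem?_eq_some_iff).mp hfg).2
    · rw [List.mem_iff_getElem]
      refine ⟨pvLastIdx l c - (j + 1), by simp [List.length_drop]; omega, ?_⟩
      rw [List.getElem_drop]
      have he : j + 1 + (pvLastIdx l c - (j + 1)) = pvLastIdx l c := by omega
      simp_rw [he]
      exact ((List.getElem?_eq_some_iff).mp hlg).2

def pvBBody (fl : PySem.Dict Char Int × PySem.Dict Char Int) (p : Int × Char) :
    PySem.Dict Char Int × PySem.Dict Char Int :=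
  let first := if fl.1.contains p.2 then fl.1 else fl.1.insert p.2 p.1
  (first, fl.2.insert p.2 p.1)

theorem pv_Bloop (rest : List Char) : ∀ (k : Int) (F L : PySem.Dict Char Int) (c : Char),
    (((PySem.List.enumerate rest k).foldl pvBBody (F, L)).1.contains c =
      (F.contains c || rest.contains c)) ∧
    (((PySem.List.enumerate rest k).foldl pvBBody (F, L)).1.getD c 0 =
      if F.contains c then F.getD c 0
      else if c ∈ rest then k + (rest.idxOf c : Int) else F.getD c 0) ∧
    (((PySem.List.enumerate rest k).foldl pvBBody (F, L)).2.getD c 0 =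
      if c ∈ rest then k + (pvLastIdx rest c : Int) else L.getD c 0) := by
  induction rest with
  | nil =>
    intro k F L c
    simp [PySem.List.enumerate]
  | cons x rest' ih =>
    intro k F L c
    have hstep : (PySem.List.enumerate (x :: rest') k).foldl pvBBody (F, L) =
        (PySem.List.enumerate rest' (k + 1)).foldl pvBBody
          (if F.contains x then F else F.insert x k, L.insert x k) := by
      rfl
    rw [hstep]
    obtain ⟨ih1, ih2, ih3⟩ := ih (k + 1) (if F.contains x then F else F.insert x k)
      (L.insert x k) c
    have hcont : (if F.contains x then F else F.insert x k).contains c =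
        (c == x || F.contains c) := by
      split
      · next hfx =>
        by_cases hcx : c = x
        · subst hcx; simp [hfx]
        · simp [beq_iff_eq, hcx]
      · rw [PySem.Dict.contains_insert]
    have hgetD : ¬ c = x → (if F.contains x then F else F.insert x k).getD c 0 =
        F.getD c 0 := by
      intro hcx
      split
      · rfl
      · rw [PySem.Dict.getD_insert, if_neg hcx]
    refine ⟨?_, ?_, ?_⟩
    · rw [ih1, hcont, List.contains_cons]
      cases F.contains c <;> cases rest'.contains c <;> cases (c == x) <;> simp
    · rw [ih2, hcont]
      by_cases hfc : F.contains c = true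
      · have h1 : (c == x || F.contains c) = true := by simp [hfc]
        rw [h1, if_pos rfl, if_pos hfc]
        by_cases hcx : c = x
        · subst hcx
          split
          · rfl
          · next hfx => exact absurd hfc (by simpa using hfx)
        · exact hgetD hcx
      · by_cases hcx : c = x
        · subst hcx
          simp only [beq_self_eq_true, Bool.true_or, if_true]
          rw [if_neg hfc]
          rw [if_neg hfc]
          rw [if_pos List.mem_cons_self, List.idxOf_cons_self,
            PySem.Dict.getD_insert, if_pos rfl]
          simp
        · have h1 : (c == x || F.contains c) = false := by
            simp [beq_iff_eq, hcx, hfc]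
          rw [h1]
          simp only [Bool.false_eq_true, if_false]
          rw [if_neg hfc, hgetD hcx]
          by_cases hcr : c ∈ rest'
          · rw [if_pos hcr, if_pos (List.mem_cons_of_mem _ hcr)]
            have h2 : (x :: rest').idxOf c = rest'.idxOf c + 1 := by
              rw [List.idxOf_cons]
              have : (x == c) = false := by
                simp [beq_iff_eq]
                exact fun h => hcx h.symm
              rw [this]
              rfl
            rw [h2]
            push_cast
            ring
          · rw [if_neg hcr, if_neg (by simp [hcx, hcr])]
    · rw [ih3]
      by_cases hcr : c ∈ rest'
      · have h1 : pvLastIdx (x :: rest') c = pvLastIdx rest' c + 1 := by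
          simp [pvLastIdx, hcr]
        rw [if_pos hcr, if_pos (List.mem_cons_of_mem _ hcr), h1]
        push_cast
        ring
      · rw [if_neg hcr]
        by_cases hcx : c = x
        · subst hcx
          have h1 : pvLastIdx (c :: rest') c = 0 := by simp [pvLastIdx, hcr]
          rw [if_pos List.mem_cons_self, h1, PySem.Dict.getD_insert, if_pos rfl]
          simp
        · rw [if_neg (by simp [hcx, hcr]), PySem.Dict.getD_insert, if_neg hcx]

def pvMidIf (l : List Char) (c : Char) : Finset Char :=
  if c ∈ l ∧ l.idxOf c < pvLastIdx l c then pvMid l c else ∅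

def pvTarget (l : List Char) : Finset (List Char) :=
  ulLetters.toFinset.biUnion (fun c => (pvMidIf l c).image (fun m => [c, m, c]))

theorem pv_len_ofList_eq_card (w : List Char) :
    PySem.Set.len (PySem.Set.ofList w) = (w.toFinset.card : Int) := by
  have h1 : (PySem.Set.ofList w).toFinset = w.toFinset := by
    ext a
    simp [PySem.Set.mem_ofList]
  rw [PySem.Set.len, ← h1, List.toFinset_card_of_nodup (PySem.Set.nodup_ofList w)]

theorem pv_ul_eq_card (s : String) : ul s = ((pvTarget s.toList).card : Int) := by
  have hbody : ul s = PySem.Set.len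
      ((PySem.List.pyRange 0 s.toList.length 1).foldl
        (fun st m => pvABody st (PySem.List.pyGetD s.toList m ' '))
        (PySem.Set.empty, PySem.Set.empty, PySem.Dict.counter s.toList)).2.1 := rfl
  rw [hbody, pv_foldl_pyRange_getD]
  have hinit : (PySem.Set.empty : PySem.Set Char) = PySem.Set.ofList [] := rfl
  have hmem := pv_Aloop s.toList [] PySem.Set.empty (PySem.Dict.counter s.toList)
    (fun c => PySem.Dict.getD_counter s.toList c)
    (fun c => by rw [PySem.Dict.contains_counter]; rfl)
  rw [hinit] at *
  have hnd := pv_Aloop_nodup s.toList (PySem.Set.ofList []) PySem.Set.empty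
    (PySem.Dict.counter s.toList) List.nodup_nil
  have hfin : (s.toList.foldl pvABody
      (PySem.Set.ofList [], PySem.Set.empty, PySem.Dict.counter s.toList)).2.1.toFinset =
      pvTarget s.toList := by
    ext w
    rw [List.mem_toFinset, hmem w]
    simp only [PySem.Set.empty, List.not_mem_nil, false_or, List.nil_append]
    constructor
    · rintro ⟨c, p, q, m, hsplit, hc, hp, hq, rfl⟩
      have hg : pvGood s.toList c m := ⟨hc, p, q, hsplit, hp, hq⟩
      rw [pv_good_iff] at hg
      obtain ⟨h1, h2, h3, h4⟩ := hg
      rw [pvTarget, Finset.mem_biUnion]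
      refine ⟨c, List.mem_toFinset.mpr h1, ?_⟩
      rw [Finset.mem_image]
      exact ⟨m, by rw [pvMidIf, if_pos ⟨h2, h3⟩]; exact h4, rfl⟩
    · intro hw
      rw [pvTarget, Finset.mem_biUnion] at hw
      obtain ⟨c, hc, hw⟩ := hw
      rw [Finset.mem_image] at hw
      obtain ⟨m, hm, rfl⟩ := hw
      rw [pvMidIf] at hm
      split at hm
      · next hcond =>
        have hg : pvGood s.toList c m := by
          rw [pv_good_iff]
          exact ⟨List.mem_toFinset.mp hc, hcond.1, hcond.2, hm⟩
        obtain ⟨hlet, p, q, hsplit, hp, hq⟩ := hg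
        exact ⟨c, p, q, m, hsplit, hlet, hp, hq, rfl⟩
      · exact absurd hm (Finset.notMem_empty m)
  rw [PySem.Set.len, ← hfin, List.toFinset_card_of_nodup hnd]

theorem pv_card_target (l : List Char) :
    (pvTarget l).card = ∑ c ∈ ulLetters.toFinset, (pvMidIf l c).card := by
  rw [pvTarget, Finset.card_biUnion]
  · refine Finset.sum_congr rfl fun c _ => ?_
    exact Finset.card_image_of_injective _ (fun a b h => by simpa using h)
  · intro c _ d _ hcd
    simp only [Function.onFun, Finset.disjoint_left]
    intro w hw hw'
    rw [Finset.mem_image] at hw hw'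
    obtain ⟨m, _, rfl⟩ := hw
    obtain ⟨m', _, heq⟩ := hw'
    apply hcd
    have := (List.cons.injEq _ _ _ _).mp heq.symm
    exact this.1

theorem pv_ul_alt_eq_sum (s : String) :
    ul_alt s = ∑ c ∈ ulLetters.toFinset, ((pvMidIf s.toList c).card : Int) := by
  have hletn : ulLetters.Nodup := by decide
  have hbody : ul_alt s = ulLetters.foldl (fun tot c =>
      if ((PySem.List.enumerate s.toList 0).foldl pvBBody
            (PySem.Dict.empty, PySem.Dict.empty)).1.contains c &&
          decide (((PySem.List.enumerate s.toList 0).foldl pvBBody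
            (PySem.Dict.empty, PySem.Dict.empty)).1.getD c 0 <
            ((PySem.List.enumerate s.toList 0).foldl pvBBody
            (PySem.Dict.empty, PySem.Dict.empty)).2.getD c 0) then
        tot + PySem.Set.len (PySem.Set.ofList
          (PySem.List.slice s.toList
            (some (((PySem.List.enumerate s.toList 0).foldl pvBBody
              (PySem.Dict.empty, PySem.Dict.empty)).1.getD c 0 + 1))
            (some (((PySem.List.enumerate s.toList 0).foldl pvBBody
              (PySem.Dict.empty, PySem.Dict.empty)).2.getD c 0))))
      else tot) 0 := rfl
  rw [hbody]
  have hterm : ∀ (acc : Int), ∀ c ∈ ulLetters,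
      (if ((PySem.List.enumerate s.toList 0).foldl pvBBody
            (PySem.Dict.empty, PySem.Dict.empty)).1.contains c &&
          decide (((PySem.List.enumerate s.toList 0).foldl pvBBody
            (PySem.Dict.empty, PySem.Dict.empty)).1.getD c 0 <
            ((PySem.List.enumerate s.toList 0).foldl pvBBody
            (PySem.Dict.empty, PySem.Dict.empty)).2.getD c 0) then
        acc + PySem.Set.len (PySem.Set.ofList
          (PySem.List.slice s.toList
            (some (((PySem.List.enumerate s.toList 0).foldl pvBBody
              (PySem.Dict.empty, PySem.Dict.empty)).1.getD c 0 + 1))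
            (some (((PySem.List.enumerate s.toList 0).foldl pvBBody
              (PySem.Dict.empty, PySem.Dict.empty)).2.getD c 0))))
      else acc) = acc + ((pvMidIf s.toList c).card : Int) := by
    intro acc c _
    obtain ⟨b1, b2, b3⟩ := pv_Bloop s.toList 0 PySem.Dict.empty PySem.Dict.empty c
    simp only [PySem.Dict.contains_empty, PySem.Dict.getD_empty, Bool.false_or,
      Bool.false_eq_true, if_false] at b1 b2 b3
    rw [b1, b2, b3]
    by_cases hc : c ∈ s.toList
    · rw [if_pos hc, if_pos hc]
      have hcl : s.toList.contains c = true := by simpa using hc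
      by_cases hlt : s.toList.idxOf c < pvLastIdx s.toList c
      · have hcond : (s.toList.contains c &&
            decide ((0 : Int) + (s.toList.idxOf c : Int) <
              (0 : Int) + (pvLastIdx s.toList c : Int))) = true := by
          simp [hc]
          omega
        rw [hcond, if_pos rfl]
        have hidx : ((0 : Int) + (s.toList.idxOf c : Int) + 1) =
            ((s.toList.idxOf c + 1 : Nat) : Int) := by push_cast; ring
        have hidx2 : ((0 : Int) + (pvLastIdx s.toList c : Int)) =
            ((pvLastIdx s.toList c : Nat) : Int) := by push_cast; ring
        rw [hidx, hidx2, PySem.List.slice_natCast, pv_len_ofList_eq_card]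
        rw [pvMidIf, if_pos ⟨hc, hlt⟩, pvMid]
        have : pvLastIdx s.toList c - s.toList.idxOf c - 1 =
            pvLastIdx s.toList c - (s.toList.idxOf c + 1) := by omega
        rw [this]
      · have hcond : (s.toList.contains c &&
            decide ((0 : Int) + (s.toList.idxOf c : Int) <
              (0 : Int) + (pvLastIdx s.toList c : Int))) = false := by
          simp
          intro _
          omega
        rw [hcond]
        simp only [Bool.false_eq_true, if_false]
        rw [pvMidIf, if_neg (fun h => hlt h.2)]
        simp
    · have hcl : s.toList.contains c = false := by simpa using hc
      rw [if_neg hc, if_neg hc, hcl]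
      simp only [Bool.false_and, Bool.false_eq_true, if_false]
      rw [pvMidIf, if_neg (fun h => hc h.1)]
      simp
  rw [PySem.List.foldl_congr_mem _ _
    (fun acc c => acc + ((pvMidIf s.toList c).card : Int)) 0 hterm,
    PySem.List.foldl_add]
  rw [List.sum_toFinset _ hletn]
  simp

theorem pv_final (s : String) : ul s = ul_alt s := by
  rw [pv_ul_eq_card, pv_card_target, pv_ul_alt_eq_sum]
  push_cast
  rfl

-- ===== VERDICT (by name: the statement is the Claim_ definition above) =====
theorem ul_spec : Claim_equal_ul := by
  intro s _
  unfold Spec_ul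
  exact pv_final s
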